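-- pv_equiv track=rewrite | github.com/widelec9/codewars | kata/5kyu/ascii85_encoding_decoding.py | fromAscii85
-- ===== SOURCE A (Python) =====
-- def fromAscii85(data):
--     data = [c for c in data if c not in [' ', '\t', '\n']][2:-2]
--     dec = []
--     pad = 0
--     while data:
--         if data[0] == 'z':
--             dec += ['\0'] * 4
--             data.pop(0)
--             continue
--         if len(data) < 5:
--             pad = 5 - len(data)
--             data += ['u'] * pad
--         num = 0
--         for i in range(4, -1, -1):
--             num += (ord(data.pop(0)) - 33) * (85**i)
--         for i in range(4):
--             dec += [chr((num >> (24 - i*8)) & 0xFF)]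
--     return ''.join(dec[:-pad]) if pad else ''.join(dec)
-- ===== SOURCE B (Python) =====
-- def _dec5(g):
--     num = 0
--     for c in g:
--         num = num * 85 + (ord(c) - 33)
--     m = num % 4294967296
--     bs = []
--     for _ in range(4):
--         bs.append(chr(m % 256))
--         m //= 256
--     return ''.join(reversed(bs))
--
-- def fromAscii85(data):
--     chars = [c for c in data if c not in (' ', '\t', '\n')][2:-2]
--     toks = []
--     i = 0
--     while i < len(chars):
--         if chars[i] == 'z':
--             toks.append('z')
--             i += 1
--         else:
--             toks.append(''.join(chars[i:i+5]))
--             i += 5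
--     out = []
--     for t in toks:
--         if t == 'z':
--             out.append('\0' * 4)
--         elif len(t) == 5:
--             out.append(_dec5(t))
--         else:
--             k = len(t)
--             out.append(_dec5(t + 'u' * (5 - k))[:k - 1])
--     return ''.join(out)
-- ===== Notes on version B (the rewrite author's own statement) =====
-- stated objective: faster
-- what changed: B replaces A's destructive while-loop (pop(0) and += on the character list, a pad counter, and a final negative-slice trim of the joined output) by a two-pass tokenize-then-decode over an indexed list: it first splits the filtered [2:-2] characters into tokens (the zero-group marker standalone, otherwise runs of up to five characters), then decodes each token independently via Horner accumulation and base-256 digit extraction of num mod 2**32, truncating only the final short token.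
import Mathlib
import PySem

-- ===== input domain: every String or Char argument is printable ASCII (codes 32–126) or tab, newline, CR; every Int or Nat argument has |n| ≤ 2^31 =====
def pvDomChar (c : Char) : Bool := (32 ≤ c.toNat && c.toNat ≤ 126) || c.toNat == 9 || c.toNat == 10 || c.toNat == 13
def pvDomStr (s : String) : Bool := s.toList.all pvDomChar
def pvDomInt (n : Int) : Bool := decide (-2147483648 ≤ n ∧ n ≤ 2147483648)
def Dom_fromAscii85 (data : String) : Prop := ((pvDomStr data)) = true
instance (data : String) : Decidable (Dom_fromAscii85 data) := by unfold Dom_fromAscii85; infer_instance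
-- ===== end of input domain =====

-- B re-implements the Ascii85 decoder as tokenize-then-decode (group list built first, each
-- token decoded independently) instead of A's destructive while/pop loop with a trailing
-- pad-trim; same return value on every input (objective: alternative decomposition).

-- ===== PORT A =====
-- inner 'for i in range(4,-1,-1): num += (ord(data.pop(0)) - 33) * 85**i' step;
-- the [] branch is Python's IndexError from pop(0), never reached (5 elements are present).
def a85numStep (s : Int × List Char) (i : Int) : Int × List Char :=
  match s with
  | (num, c :: rest) => (num + ((c.toNat : Int) - 33) * 85 ^ i.toNat, rest)
  | (num, []) => (num, [])

-- cited by fromAscii85Loop's decreasing_by: the five pops consume exactly five elements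
theorem a85num_snd (num : Int) (xs : List Char) :
    ((PySem.List.pyRange 4 (-1) (-1)).foldl a85numStep (num, xs)).2 = xs.drop 5 := by
  have h : PySem.List.pyRange 4 (-1) (-1) = [4, 3, 2, 1, 0] := by decide
  rw [h]
  rcases xs with _ | ⟨a, _ | ⟨b, _ | ⟨c, _ | ⟨d, _ | ⟨e, t⟩⟩⟩⟩⟩ <;> simp [a85numStep]

-- the while loop of A over (data, dec, pad); '>>' is arithmetic shift (24 - i*8 ≥ 0 here)
def fromAscii85Loop (data dec : List Char) (pad : Int) : List Char × Int :=
  match data with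
  | [] => (dec, pad)
  | c :: rest =>
    if c = 'z' then fromAscii85Loop rest (dec ++ PySem.List.pyRepeat ['\x00'] 4) pad
    else
      let data1 := if (c :: rest).length < 5 then
          (c :: rest) ++ PySem.List.pyRepeat ['u'] (5 - ((c :: rest).length : Int)) else c :: rest
      let pad1 := if (c :: rest).length < 5 then 5 - ((c :: rest).length : Int) else pad
      let st := (PySem.List.pyRange 4 (-1) (-1)).foldl a85numStep (0, data1)
      fromAscii85Loop st.2
        ((PySem.List.pyRange 0 4 1).foldl
          (fun d i => d ++ [Char.ofNat (PySem.Int.band (st.1 >>> (24 - i * 8).toNat) 255).toNat]) dec)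
        pad1
termination_by data.length
decreasing_by
  · simp only [List.length_cons]; omega
  · rw [a85num_snd]
    split <;> simp [PySem.List.pyRepeat_singleton] <;> omega

def fromAscii85 (data : String) : String :=
  let d := PySem.List.slice (data.toList.filter (fun c => !([' ', '\t', '\n'].contains c)))
            (some 2) (some (-2))
  let r := fromAscii85Loop d [] 0
  if r.2 ≠ 0 then String.ofList (PySem.List.slice r.1 none (some (-r.2)))
  else String.ofList r.1

-- ===== PORT B =====
-- _dec5: Horner accumulation, then the four base-256 digits of num % 2**32, little-endian, reversed
def a85Dec5 (g : List Char) : List Char :=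
  let num := g.foldl (fun num c => num * 85 + ((c.toNat : Int) - 33)) 0
  let st := (PySem.List.pyRange 0 4 1).foldl
    (fun (s : List Char × Int) _ =>
      (s.1 ++ [Char.ofNat (PySem.Int.mod s.2 256).toNat], PySem.Int.floordiv s.2 256))
    ([], PySem.Int.mod num 4294967296)
  st.1.reverse

-- tokenizer: 'z' is a standalone token, otherwise a run of (up to) five characters
def a85Toks (chars : List Char) (i : Nat) : List (List Char) :=
  if h : i < chars.length then
    if chars[i] = 'z' then ['z'] :: a85Toks chars (i + 1)
    else PySem.List.slice chars (some (i : Int)) (some ((i : Int) + 5)) :: a85Toks chars (i + 5)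
  else []
termination_by chars.length - i

def fromAscii85_alt (data : String) : String :=
  let chars := PySem.List.slice (data.toList.filter (fun c => !([' ', '\t', '\n'].contains c)))
                (some 2) (some (-2))
  let toks := a85Toks chars 0
  let out := toks.foldl (fun out t =>
    if t = ['z'] then out ++ [PySem.List.pyRepeat ['\x00'] 4]
    else if t.length = 5 then out ++ [a85Dec5 t]
    else out ++ [PySem.List.slice
      (a85Dec5 (t ++ PySem.List.pyRepeat ['u'] (5 - (t.length : Int))))
      none (some ((t.length : Int) - 1))]) []
  String.ofList out.flatten

-- ===== PRECONDITION & SPEC =====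
def Spec_fromAscii85 (data : String) (out : String) : Prop := out = fromAscii85_alt data
instance (data : String) (out : String) : Decidable (Spec_fromAscii85 data out) := by unfold Spec_fromAscii85; infer_instance

-- ===== CLAIM (what is proved, stated in full; the proofs are below) =====
def Claim_equal_fromAscii85 : Prop := ∀ (data : String), Dom_fromAscii85 data → Spec_fromAscii85 data (fromAscii85 data)

-- ===== LEMMAS AND PROOFS =====

-- structural form of B's tokenizer
def toksL : List Char → List (List Char)
  | [] => []
  | c :: rest =>
    if c = 'z' then ['z'] :: toksL rest
    else ((c :: rest).take 5) :: toksL ((c :: rest).drop 5)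
termination_by l => l.length
decreasing_by all_goals simp

-- B's per-token decoder, extracted from the fold body
def decB (t : List Char) : List Char :=
  if t = ['z'] then PySem.List.pyRepeat ['\x00'] 4
  else if t.length = 5 then a85Dec5 t
  else PySem.List.slice
    (a85Dec5 (t ++ PySem.List.pyRepeat ['u'] (5 - (t.length : Int))))
    none (some ((t.length : Int) - 1))

-- the four output bytes both programs produce from a group value
def chunkA (n : Int) : List Char :=
  [Char.ofNat (n % 4294967296 / 16777216 % 256).toNat,
   Char.ofNat (n % 4294967296 / 65536 % 256).toNat,
   Char.ofNat (n % 4294967296 / 256 % 256).toNat,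
   Char.ofNat (n % 4294967296 % 256).toNat]

def hornerNum (g : List Char) : Int := g.foldl (fun n c => n * 85 + ((c.toNat : Int) - 33)) 0

def trimA (r : List Char × Int) : List Char :=
  if r.2 ≠ 0 then PySem.List.slice r.1 none (some (-r.2)) else r.1

theorem band255 (x : Int) : PySem.Int.band x 255 = x % 256 := by
  have h8 : ∀ n : Nat, n &&& 255 = n % 256 := by
    intro n; have := Nat.and_two_pow_sub_one_eq_mod n 8; norm_num at this; exact this
  have h255 : (255 : Int).toNat = 255 := rfl
  unfold PySem.Int.band
  split_ifs with h1 h2 h2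
  · rw [h255, h8]; omega
  · norm_num at h2
  · rw [h255, Nat.and_comm, h8]; omega
  · norm_num at h2

theorem toks_eq (chars : List Char) (i : Nat) : a85Toks chars i = toksL (chars.drop i) := by
  induction i using a85Toks.induct chars with
  | case1 i h hz ih =>
    rw [a85Toks]
    simp only [h, dif_pos, hz, if_pos]
    rw [List.drop_eq_getElem_cons h, ih]
    rw [toksL]
    simp [hz]
  | case2 i h hz ih =>
    rw [a85Toks, dif_pos h, if_neg hz, ih]
    have hd : List.drop i chars = chars[i] :: List.drop (i + 1) chars :=
      List.drop_eq_getElem_cons h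
    have h5 : PySem.List.slice chars (some (i : Int)) (some ((i : Int) + 5))
        = (chars.drop i).take 5 := by
      have := PySem.List.slice_natCast_add chars i 5
      norm_num at this ⊢
      exact this
    rw [hd, toksL, if_neg hz]
    congr 1
    · rw [h5, hd]
    · rw [← hd]
      have h45 : List.drop (i + 5) chars = List.drop 5 (List.drop i chars) := by
        rw [List.drop_drop]
      rw [h45]
  | case3 i h =>
    rw [a85Toks, dif_neg h, List.drop_of_length_le (by omega), toksL]


theorem div2 (a : Int) : a / 256 / 256 = a / 65536 := by
  rw [Int.ediv_ediv_of_nonneg (show (0:Int) ≤ 256 by norm_num)]; norm_num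

theorem div3 (a : Int) : a / 256 / 256 / 256 = a / 16777216 := by
  rw [div2, Int.ediv_ediv_of_nonneg (show (0:Int) ≤ 256 by norm_num)]; norm_num

theorem dec5_eq (g : List Char) : a85Dec5 g = chunkA (hornerNum g) := by
  have hr : PySem.List.pyRange 0 4 1 = [0, 1, 2, 3] := by decide
  unfold a85Dec5 chunkA hornerNum
  rw [hr]
  simp [List.foldl]
  constructor
  · exact congrArg Char.ofNat (congrArg Int.toNat (by rw [div3]))
  · exact congrArg Char.ofNat (congrArg Int.toNat (by rw [div2]))

theorem num_fst (a b c d e : Char) (t : List Char) :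
    ((PySem.List.pyRange 4 (-1) (-1)).foldl a85numStep (0, a :: b :: c :: d :: e :: t)).1
      = hornerNum [a, b, c, d, e] := by
  have h : PySem.List.pyRange 4 (-1) (-1) = [4, 3, 2, 1, 0] := by decide
  rw [h]
  simp [a85numStep, hornerNum, List.foldl]
  ring

theorem outfold (num : Int) (dec : List Char) :
    (PySem.List.pyRange 0 4 1).foldl
      (fun d i => d ++ [Char.ofNat (PySem.Int.band (num >>> (24 - i * 8).toNat) 255).toNat]) dec
      = dec ++ chunkA num := by
  have hr : PySem.List.pyRange 0 4 1 = [0, 1, 2, 3] := by decide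
  have hb : ∀ s : Nat, PySem.Int.band (num >>> s) 255 = num / 2 ^ s % 256 := by
    intro s; rw [Int.shiftRight_eq_div_pow, band255]; norm_num
  have e0 : ((24 : Int) - 0 * 8).toNat = (24 : Nat) := by decide
  have e1 : ((24 : Int) - 1 * 8).toNat = (16 : Nat) := by decide
  have e2 : ((24 : Int) - 2 * 8).toNat = (8 : Nat) := by decide
  have e3 : ((24 : Int) - 3 * 8).toNat = (0 : Nat) := by decide
  rw [hr]
  simp only [List.foldl_cons, List.foldl_nil, e0, e1, e2, e3,
    Int.shiftRight_natCast_right, hb]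
  norm_num [chunkA]
  refine ⟨?_, ?_, ?_⟩ <;> exact congrArg Char.ofNat (congrArg Int.toNat (by omega))

theorem num_fst5 (l : List Char) (h : 5 ≤ l.length) :
    ((PySem.List.pyRange 4 (-1) (-1)).foldl a85numStep (0, l)).1
      = hornerNum (l.take 5) := by
  rcases l with _ | ⟨a, _ | ⟨b, _ | ⟨c, _ | ⟨d, _ | ⟨e, t⟩⟩⟩⟩⟩ <;> simp at h
  simpa using num_fst a b c d e t

theorem loop_long (c : Char) (rest dec : List Char) (hz : ¬ c = 'z')
    (hlen : ¬ (c :: rest).length < 5) :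
    fromAscii85Loop (c :: rest) dec 0
      = fromAscii85Loop ((c :: rest).drop 5)
          (dec ++ chunkA (hornerNum ((c :: rest).take 5))) 0 := by
  rw [fromAscii85Loop]
  simp only [if_neg hz, if_neg hlen]
  rw [outfold, a85num_snd, num_fst5 _ (by simp at hlen ⊢; omega)]

theorem loop_short (c : Char) (rest dec : List Char) (hz : ¬ c = 'z')
    (hlen : (c :: rest).length < 5) :
    trimA (fromAscii85Loop (c :: rest) dec 0) = dec ++ decB (c :: rest) := by
  have hlen1 : 1 ≤ (c :: rest).length := by simp
  have hlenr : rest.length < 4 := by have := hlen; simp at this; omega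
  have hpad : PySem.List.pyRepeat ['u'] (5 - ((c :: rest).length : Int))
      = List.replicate (5 - (c :: rest).length) 'u' := by
    rw [PySem.List.pyRepeat_singleton]
    congr 1
    omega
  have hplen : ((c :: rest) ++ List.replicate (5 - (c :: rest).length) 'u').length = 5 := by
    simp; omega
  rw [fromAscii85Loop]
  simp only [if_neg hz, if_pos hlen, hpad]
  rw [outfold, a85num_snd, num_fst5 _ (le_of_eq hplen.symm)]
  rw [List.drop_of_length_le (le_of_eq hplen), List.take_of_length_le (le_of_eq hplen)]
  rw [fromAscii85Loop]
  unfold trimA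
  have hk : (5 : Int) - ((c :: rest).length : Int) = (((5 - (c :: rest).length : Nat)) : Int) := by
    omega
  rw [if_pos (by omega), hk, PySem.List.slice_to_neg_natCast _ _ (by omega)]
  have hlen2 : (dec ++ chunkA (hornerNum (c :: rest ++ List.replicate (5 - (c :: rest).length) 'u'))).length
      - (5 - (c :: rest).length) = dec.length + ((c :: rest).length - 1) := by
    simp [chunkA]; omega
  rw [hlen2, List.take_length_add_append]
  unfold decB
  rw [if_neg (by simp [hz]), if_neg (by omega), hpad, dec5_eq,
    PySem.List.slice_to _ (by omega)]
  congr 1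
  congr 1
  omega

theorem loop_key (n : Nat) : ∀ l dec, l.length ≤ n →
    trimA (fromAscii85Loop l dec 0) = dec ++ ((toksL l).map decB).flatten := by
  induction n with
  | zero =>
    intro l dec hl
    have hnil : l = [] := by cases l <;> simp_all
    subst hnil
    simp [fromAscii85Loop, trimA, toksL]
  | succ n ih =>
    intro l dec hl
    rcases l with _ | ⟨c, rest⟩
    · simp [fromAscii85Loop, trimA, toksL]
    by_cases hz : c = 'z'
    · subst hz
      rw [show fromAscii85Loop ('z' :: rest) dec 0
          = fromAscii85Loop rest (dec ++ PySem.List.pyRepeat ['\x00'] 4) 0 from by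
        rw [fromAscii85Loop]; simp]
      rw [ih rest _ (by simp at hl; omega)]
      rw [toksL]
      simp [decB]
    by_cases hlen : (c :: rest).length < 5
    · rw [loop_short c rest dec hz hlen]
      have htk : (c :: rest).take 5 = c :: rest := List.take_of_length_le (by omega)
      have hdr : (c :: rest).drop 5 = [] := List.drop_of_length_le (by omega)
      rw [toksL]
      simp only [if_neg hz, htk, hdr]
      rw [toksL]
      simp
    · rw [loop_long c rest dec hz hlen]
      have hdr : ((c :: rest).drop 5).length ≤ n := by
        simp only [List.length_drop]; simp at hl ⊢; omega
      rw [ih _ _ hdr, toksL]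
      simp only [if_neg hz]
      have h5 : ((c :: rest).take 5).length = 5 := by
        simp only [List.length_take]; simp at hlen ⊢; omega
      have hnz : ¬ ((c :: rest).take 5 = ['z']) := by
        intro hcon; rw [hcon] at h5; simp at h5
      simp only [List.map_cons, List.flatten_cons, decB, if_neg hnz, if_pos h5, dec5_eq]
      simp [List.append_assoc]

theorem alt_eq (data : String) :
    fromAscii85_alt data =
      String.ofList ((toksL (PySem.List.slice
        (data.toList.filter (fun c => !([' ', '\t', '\n'].contains c)))
        (some 2) (some (-2)))).map decB).flatten := by
  have hfun : (fun (out : List (List Char)) (t : List Char) =>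
      if t = ['z'] then out ++ [PySem.List.pyRepeat ['\x00'] 4]
      else if t.length = 5 then out ++ [a85Dec5 t]
      else out ++ [PySem.List.slice
        (a85Dec5 (t ++ PySem.List.pyRepeat ['u'] (5 - (t.length : Int))))
        none (some ((t.length : Int) - 1))])
      = fun out t => out ++ [decB t] := by
    funext out t; unfold decB; split_ifs <;> rfl
  simp only [fromAscii85_alt]
  rw [hfun, PySem.List.foldl_append_singleton_eq_map, toks_eq]
  simp

-- ===== VERDICT (by name: the statement is the Claim_ definition above) =====
theorem fromAscii85_spec : Claim_equal_fromAscii85 := by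
  intro data _
  unfold Spec_fromAscii85
  rw [alt_eq]
  have hA : fromAscii85 data = String.ofList (trimA (fromAscii85Loop
      (PySem.List.slice (data.toList.filter (fun c => !([' ', '\t', '\n'].contains c)))
        (some 2) (some (-2))) [] 0)) := by
    simp only [fromAscii85, trimA]
    split_ifs <;> rfl
  rw [hA, loop_key _ _ [] le_rfl]
  simp
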